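-- pv_equiv track=rewrite | github.com/MattReg12/python_codewars | cats_and_dogs.py | solve
-- ===== SOURCE A (Python) =====
-- def solve(arr, n):
--     caught_array = arr[:]
--     for i, animal in enumerate(arr):
--         constant_i = i
--         if animal == 'C':
--             continue
--         else:
--             i -= n
--             while (i <= (constant_i + n) and i < len(arr)):
--                 if i < 0 or arr[i] == 'D':
--                     i += 1
--                     continue
--                 else:
--                     already_caught = caught_array[i] == True
--                     if already_caught:
--                         i += 1
--                         continue
--                     else:
--                         caught_array[i]  = True
--                         break
--     return caught_array.count(True)
-- ===== SOURCE B (Python) =====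
-- def solve(arr, n):
--     # Two-pointer greedy: dogs are scanned left to right, and the lower end of a
--     # dog's window (i - n) only grows, so catchable indices ("cats" = anything
--     # that is not 'D') can be consumed from a single advancing pointer.
--     cats = [j for j, a in enumerate(arr) if a != 'D']
--     p = 0
--     count = 0
--     for i, a in enumerate(arr):
--         if a == 'C':
--             continue
--         while p < len(cats) and cats[p] < i - n:
--             p += 1
--         if p < len(cats) and cats[p] <= i + n:
--             p += 1
--             count += 1
--     return count
-- ===== Notes on version B (the rewrite author's own statement) =====
-- stated objective: faster
-- what changed: A rescans the whole window [i-n, i+n] through the caught-array for every dog; B precomputes the sorted list of catchable indices once and consumes it with a single advancing pointer (the window's lower end only grows), one linear pass in total.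
import Mathlib
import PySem

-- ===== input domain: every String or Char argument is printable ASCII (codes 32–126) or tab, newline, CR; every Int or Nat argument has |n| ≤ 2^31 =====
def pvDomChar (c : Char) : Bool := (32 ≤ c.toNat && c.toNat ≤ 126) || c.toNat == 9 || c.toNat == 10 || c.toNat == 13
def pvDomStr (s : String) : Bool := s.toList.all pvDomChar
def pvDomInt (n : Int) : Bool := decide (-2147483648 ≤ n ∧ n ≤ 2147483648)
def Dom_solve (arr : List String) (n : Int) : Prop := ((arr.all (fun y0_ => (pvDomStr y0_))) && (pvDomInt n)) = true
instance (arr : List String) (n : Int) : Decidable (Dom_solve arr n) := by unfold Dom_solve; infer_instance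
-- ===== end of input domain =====

-- B replaces A's per-dog window rescan with one advancing pointer over the
-- (naturally sorted) list of catchable indices: a two-pointer single pass.

-- ===== PORT A =====
-- Python's caught_array holds each original string until it is overwritten by True;
-- ACell.str s is such a string cell, ACell.boolTrue the True marker ('cell == True'
-- holds exactly for boolTrue, since a str never equals True in Python).
inductive ACell where
  | str : String → ACell
  | boolTrue : ACell
deriving DecidableEq, Repr

-- the inner 'while' of A: ci is Python's constant_i, i the scanning index
def solveWhile (arr : List String) (ca : List ACell) (ci n i : Int) : List ACell :=
  if h : i ≤ ci + n ∧ i < (arr.length : Int) then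
    if i < 0 ∨ PySem.List.pyGet? arr i = some "D" then
      solveWhile arr ca ci n (i + 1)
    else if PySem.List.pyGet? ca i = some ACell.boolTrue then
      solveWhile arr ca ci n (i + 1)
    else
      ca.set i.toNat ACell.boolTrue  -- caught_array[i] = True; break  (0 ≤ i here)
  else ca
termination_by (min (ci + n + 1) (arr.length : Int) - i).toNat
decreasing_by all_goals omega

def solve (arr : List String) (n : Int) : Int :=
  let init := arr.map ACell.str  -- caught_array = arr[:]
  let final := (PySem.List.enumerate arr).foldl
    (fun ca q => if q.2 = "C" then ca else solveWhile arr ca q.1 n (q.1 - n)) init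
  (final.count ACell.boolTrue : Int)  -- caught_array.count(True)

-- ===== PORT B =====
-- Source B: cats = [j for j, a in enumerate(arr) if a != 'D']
def catsOf (arr : List String) : List Int :=
  (PySem.List.enumerate arr).filterMap (fun q => if q.2 ≠ "D" then some q.1 else none)

-- Source B's inner while: advance p past cats below lo = i - n
def skipLow (cats : List Int) (lo : Int) (p : Nat) : Nat :=
  if h : p < cats.length then
    if cats[p] < lo then skipLow cats lo (p + 1) else p
  else p
termination_by cats.length - p

def solve_alt (arr : List String) (n : Int) : Int :=
  let cats := catsOf arr
  let r := (PySem.List.enumerate arr).foldl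
    (fun (st : Nat × Int) q =>
      if q.2 = "C" then st
      else
        let p := skipLow cats (q.1 - n) st.1
        if h : p < cats.length then
          if cats[p] ≤ q.1 + n then (p + 1, st.2 + 1) else (p, st.2)
        else (p, st.2)) ((0 : Nat), (0 : Int))
  r.2

-- ===== PRECONDITION & SPEC =====
def Spec_solve (arr : List String) (n : Int) (out : Int) : Prop := out = solve_alt arr n
instance (arr : List String) (n : Int) (out : Int) : Decidable (Spec_solve arr n out) := by unfold Spec_solve; infer_instance

-- ===== CLAIM (what is proved, stated in full; the proofs are below) =====
def Claim_equal_solve : Prop := ∀ (arr : List String) (n : Int), Dom_solve arr n → Spec_solve arr n (solve arr n)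

-- ===== LEMMAS AND PROOFS =====

-- index j is still catchable for A: in range, not a 'D', not yet caught
def availP (arr : List String) (ca : List ACell) (j : Int) : Prop :=
  0 ≤ j ∧ j < (arr.length : Int) ∧ PySem.List.pyGet? arr j ≠ some "D" ∧
    PySem.List.pyGet? ca j ≠ some ACell.boolTrue

-- simulation invariant between A's state ca and B's state (p, c), before index k:
-- lengths agree, the cats from position p on are uncaught, every cat before
-- position p is caught or below the next window's lower end, and c counts the caught
def SimInv (arr : List String) (n : Int) (k : Int) (ca : List ACell) (p : Nat) (c : Int) : Prop :=
  ca.length = arr.length ∧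
  p ≤ (catsOf arr).length ∧
  (∀ q, (hq : q < (catsOf arr).length) → p ≤ q →
    PySem.List.pyGet? ca ((catsOf arr)[q]) ≠ some ACell.boolTrue) ∧
  (∀ q, (hq : q < (catsOf arr).length) → q < p →
    PySem.List.pyGet? ca ((catsOf arr)[q]) = some ACell.boolTrue ∨ (catsOf arr)[q] < k - n) ∧
  c = (ca.count ACell.boolTrue : Int)

-- the fold bodies of the two ports, named for the induction
def stepA (arr : List String) (n : Int) (ca : List ACell) (q : Int × String) : List ACell :=
  if q.2 = "C" then ca else solveWhile arr ca q.1 n (q.1 - n)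

def stepB (cats : List Int) (n : Int) (st : Nat × Int) (q : Int × String) : Nat × Int :=
  if q.2 = "C" then st
  else
    let p := skipLow cats (q.1 - n) st.1
    if h : p < cats.length then
      if cats[p] ≤ q.1 + n then (p + 1, st.2 + 1) else (p, st.2)
    else (p, st.2)

-- ---- facts about catsOf ----

lemma cats_mem (arr : List String) (j : Int) :
    j ∈ catsOf arr ↔ ∃ (k : Nat) (h : k < arr.length), arr[k] ≠ "D" ∧ j = (k : Int) := by
  unfold catsOf
  rw [List.mem_filterMap]
  constructor
  · rintro ⟨q, hq, hf⟩
    rw [PySem.List.mem_enumerate_iff] at hq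
    obtain ⟨k, hk, rfl⟩ := hq
    by_cases hD : arr[k] = "D" <;> simp [hD] at hf
    exact ⟨k, hk, hD, hf.symm⟩
  · rintro ⟨k, hk, hD, rfl⟩
    refine ⟨((k : Int), arr[k]), ?_, by simp [hD]⟩
    rw [PySem.List.mem_enumerate_iff]
    exact ⟨k, hk, by simp⟩

lemma cats_sorted (arr : List String) : (catsOf arr).Pairwise (· < ·) := by
  unfold catsOf
  apply List.Pairwise.filterMap
  · intro a b hab x hx y hy
    by_cases hD : a.2 = "D" <;> simp [hD] at hx
    by_cases hD' : b.2 = "D" <;> simp [hD'] at hy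
    subst hx; subst hy; exact hab
  · exact PySem.List.pairwise_lt_enumerate arr 0

lemma cats_elem (arr : List String) (q : Nat) (hq : q < (catsOf arr).length) :
    0 ≤ (catsOf arr)[q] ∧ (catsOf arr)[q] < (arr.length : Int) ∧
      PySem.List.pyGet? arr ((catsOf arr)[q]) ≠ some "D" := by
  have hmem : (catsOf arr)[q] ∈ catsOf arr := List.getElem_mem hq
  rw [cats_mem] at hmem
  obtain ⟨k, hk, hD, heq⟩ := hmem
  rw [heq]
  refine ⟨by positivity, by exact_mod_cast hk, ?_⟩
  rw [PySem.List.pyGet?_natCast]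
  simp [hk, hD]

lemma cats_strict (arr : List String) (q1 q2 : Nat) (h1 : q1 < q2)
    (h2 : q2 < (catsOf arr).length) : (catsOf arr)[q1]'(by omega) < (catsOf arr)[q2] := by
  exact List.pairwise_iff_getElem.mp (cats_sorted arr) q1 q2 (by omega) h2 h1

lemma avail_mem (arr : List String) (ca : List ACell) (m : Int) (h : availP arr ca m) :
    m ∈ catsOf arr := by
  obtain ⟨h0, hl, hD, -⟩ := h
  rw [cats_mem]
  refine ⟨m.toNat, by omega, ?_, by omega⟩
  intro hcon
  apply hD
  rw [PySem.List.pyGet?_of_nonneg _ h0, List.getElem?_eq_getElem (by omega), hcon]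

-- ---- pyGet? / set / count helpers ----

lemma pyGet?_set_self (ca : List ACell) (j : Int) (h0 : 0 ≤ j) (hl : j < (ca.length : Int)) :
    PySem.List.pyGet? (ca.set j.toNat ACell.boolTrue) j = some ACell.boolTrue := by
  have hj : j.toNat < ca.length := by omega
  rw [PySem.List.pyGet?_of_nonneg _ h0]
  simp [hj]

lemma pyGet?_set_ne (ca : List ACell) (m : Nat) (v : ACell) (j : Int) (h0 : 0 ≤ j)
    (hne : j ≠ (m : Int)) :
    PySem.List.pyGet? (ca.set m v) j = PySem.List.pyGet? ca j := by
  rw [PySem.List.pyGet?_of_nonneg _ h0, PySem.List.pyGet?_of_nonneg _ h0]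
  rw [List.getElem?_set_ne (by omega)]

lemma count_set_true (ca : List ACell) (m : Nat) (hm : m < ca.length)
    (h : ¬ ca[m] = ACell.boolTrue) :
    (ca.set m ACell.boolTrue).count ACell.boolTrue = ca.count ACell.boolTrue + 1 := by
  induction ca generalizing m with
  | nil => simp at hm
  | cons x xs ih =>
    cases m with
    | zero => simp only [List.set_cons_zero, List.count_cons]
              simp at h; simp [h]
    | succ m' => simp only [List.set_cons_succ, List.count_cons]
                 rw [ih m' (by simpa using hm) (by simpa using h)]
                 omega

-- ---- characterization of A's while loop ----

lemma while_none (arr : List String) (ca : List ACell) (ci n i : Int) :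
    (∀ m, i ≤ m → ¬ availP arr ca m) → solveWhile arr ca ci n i = ca := by
  induction i using solveWhile.induct (arr := arr) (ca := ca) (ci := ci) (n := n) with
  | case1 i h hD ih =>
    intro hnone
    rw [solveWhile, dif_pos h, if_pos hD]
    exact ih (fun m hm => hnone m (by omega))
  | case2 i h hD hT ih =>
    intro hnone
    rw [solveWhile, dif_pos h, if_neg hD, if_pos hT]
    exact ih (fun m hm => hnone m (by omega))
  | case3 i h hD hT =>
    intro hnone
    exact absurd ⟨by push_neg at hD; omega, h.2, by push_neg at hD; exact hD.2, hT⟩ (hnone i le_rfl)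
  | case4 i h =>
    intro _; rw [solveWhile, dif_neg h]

lemma while_first (arr : List String) (ca : List ACell) (ci n : Int) (j : Int)
    (hj : availP arr ca j) (i : Int) :
    i ≤ j → (∀ m, i ≤ m → m < j → ¬ availP arr ca m) →
    solveWhile arr ca ci n i =
      if j ≤ ci + n then ca.set j.toNat ACell.boolTrue else ca := by
  induction i using solveWhile.induct (arr := arr) (ca := ca) (ci := ci) (n := n) with
  | case1 i h hD ih =>
    intro hij hmin
    have hni : ¬ availP arr ca i := by
      rcases hD with h1 | h2
      · rintro ⟨h0, -⟩; omega
      · rintro ⟨-, -, hD', -⟩; exact hD' h2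
    have hij' : i ≠ j := fun he => hni (he ▸ hj)
    rw [solveWhile, dif_pos h, if_pos hD]
    exact ih (by omega) (fun m hm hmj => hmin m (by omega) hmj)
  | case2 i h hD hT ih =>
    intro hij hmin
    have hni : ¬ availP arr ca i := fun ⟨_, _, _, h4⟩ => h4 hT
    have hij' : i ≠ j := fun he => hni (he ▸ hj)
    rw [solveWhile, dif_pos h, if_neg hD, if_pos hT]
    exact ih (by omega) (fun m hm hmj => hmin m (by omega) hmj)
  | case3 i h hD hT =>
    intro hij hmin
    have hai : availP arr ca i := ⟨by push_neg at hD; omega, h.2, by push_neg at hD; exact hD.2, hT⟩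
    have hij' : i = j := by
      by_contra hne
      exact hmin i le_rfl (by omega) hai
    subst hij'
    rw [solveWhile, dif_pos h, if_neg hD, if_neg hT, if_pos h.1]
  | case4 i h =>
    intro hij hmin
    have hl : j < (arr.length : Int) := hj.2.1
    have hno : ¬ (i ≤ ci + n) := fun hc => h ⟨hc, by omega⟩
    rw [solveWhile, dif_neg h, if_neg (by omega)]

-- ---- characterization of B's skip loop ----

lemma skipLow_ge (cats : List Int) (lo : Int) (p : Nat) : p ≤ skipLow cats lo p := by
  induction p using skipLow.induct (cats := cats) (lo := lo) with
  | case1 p h hlt ih => rw [skipLow, dif_pos h, if_pos hlt]; omega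
  | case2 p h hlt => rw [skipLow, dif_pos h, if_neg hlt]
  | case3 p h => rw [skipLow, dif_neg h]

lemma skipLow_le (cats : List Int) (lo : Int) (p : Nat) :
    p ≤ cats.length → skipLow cats lo p ≤ cats.length := by
  induction p using skipLow.induct (cats := cats) (lo := lo) with
  | case1 p h hlt ih => intro _; rw [skipLow, dif_pos h, if_pos hlt]; exact ih (by omega)
  | case2 p h hlt => intro _; rw [skipLow, dif_pos h, if_neg hlt]; omega
  | case3 p h => intro hp; rw [skipLow, dif_neg h]; omega

lemma skipLow_below (cats : List Int) (lo : Int) (p : Nat) :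
    ∀ q, p ≤ q → q < skipLow cats lo p → ∀ hq : q < cats.length, cats[q] < lo := by
  induction p using skipLow.induct (cats := cats) (lo := lo) with
  | case1 p h hlt ih =>
    intro q hpq hqs hq
    rw [skipLow, dif_pos h, if_pos hlt] at hqs
    rcases Nat.eq_or_lt_of_le hpq with rfl | hlt2
    · exact hlt
    · exact ih q hlt2 hqs hq
  | case2 p h hlt =>
    intro q hpq hqs hq
    rw [skipLow, dif_pos h, if_neg hlt] at hqs; omega
  | case3 p h =>
    intro q hpq hqs hq
    rw [skipLow, dif_neg h] at hqs; omega

lemma skipLow_stop (cats : List Int) (lo : Int) (p : Nat) :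
    ∀ h : skipLow cats lo p < cats.length, ¬ cats[skipLow cats lo p] < lo := by
  induction p using skipLow.induct (cats := cats) (lo := lo) with
  | case1 p h hlt ih => rw [skipLow, dif_pos h, if_pos hlt]; exact ih
  | case2 p h hlt => rw [skipLow, dif_pos h, if_neg hlt]; intro _; exact hlt
  | case3 p h => rw [skipLow, dif_neg h]; intro hc; omega

-- ---- the step lemmas ----

-- nothing at or after position p' = skipLow … p (and ≥ k-n) is available below cats[p']
lemma no_avail_between (arr : List String) (n k : Int) (ca : List ACell) (p : Nat) (c : Int)
    (hInv : SimInv arr n k ca p c) (m : Int) (hm : k - n ≤ m)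
    (hmlt : ∀ hq : skipLow (catsOf arr) (k - n) p < (catsOf arr).length,
      m < (catsOf arr)[skipLow (catsOf arr) (k - n) p]) :
    ¬ availP arr ca m := by
  obtain ⟨hlen, hple, h4, h5, h6⟩ := hInv
  intro hav
  obtain ⟨q, hq, hqm⟩ := List.getElem_of_mem (avail_mem arr ca m hav)
  set p' := skipLow (catsOf arr) (k - n) p with hp'
  rcases lt_or_ge q p with hqp | hqp
  · rcases h5 q hq hqp with hT | hlo
    · exact hav.2.2.2 (hqm ▸ hT)
    · omega
  · rcases lt_or_ge q p' with hqp' | hqp'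
    · have := skipLow_below (catsOf arr) (k - n) p q hqp hqp' hq
      omega
    · have hp'len : p' < (catsOf arr).length := by omega
      have hlt := hmlt hp'len
      rcases Nat.eq_or_lt_of_le hqp' with rfl | hgt
      · omega
      · have := cats_strict arr p' q hgt hq
        omega

-- position cats[p'] itself is available
lemma avail_at_skip (arr : List String) (n k : Int) (ca : List ACell) (p : Nat) (c : Int)
    (hInv : SimInv arr n k ca p c)
    (hlt : skipLow (catsOf arr) (k - n) p < (catsOf arr).length) :
    availP arr ca ((catsOf arr)[skipLow (catsOf arr) (k - n) p]) := by
  obtain ⟨hlen, hple, h4, h5, h6⟩ := hInv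
  obtain ⟨h0, hl, hD⟩ := cats_elem arr _ hlt
  exact ⟨h0, hl, hD, h4 _ hlt (skipLow_ge _ _ _)⟩

-- no available cat ≥ k-n, or the first one lies beyond k+n: A's scan changes nothing
lemma inv_step_miss (arr : List String) (n k : Int) (ca : List ACell) (p : Nat) (c : Int)
    (hInv : SimInv arr n k ca p c)
    (hmiss : ∀ h : skipLow (catsOf arr) (k - n) p < (catsOf arr).length,
      ¬ (catsOf arr)[skipLow (catsOf arr) (k - n) p] ≤ k + n) :
    solveWhile arr ca k n (k - n) = ca ∧
      SimInv arr n (k + 1) ca (skipLow (catsOf arr) (k - n) p) c := by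
  obtain ⟨hlen, hple, h4, h5, h6⟩ := hInv
  set p' := skipLow (catsOf arr) (k - n) p with hp'
  have hp'ge : p ≤ p' := skipLow_ge _ _ _
  have hp'le : p' ≤ (catsOf arr).length := skipLow_le _ _ _ hple
  constructor
  · rcases lt_or_ge p' (catsOf arr).length with hp'lt | hp'eq
    · -- the first available cat exists but is beyond the window
      have hav := avail_at_skip arr n k ca p c ⟨hlen, hple, h4, h5, h6⟩ hp'lt
      have hge : ¬ (catsOf arr)[p'] < k - n := skipLow_stop _ _ _ hp'lt
      rw [while_first arr ca k n ((catsOf arr)[p']) hav (k - n) (by omega)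
        (fun m hm hmj => no_avail_between arr n k ca p c ⟨hlen, hple, h4, h5, h6⟩ m hm
          (fun _ => hmj))]
      rw [if_neg (hmiss hp'lt)]
    · exact while_none arr ca k n (k - n)
        (fun m hm => no_avail_between arr n k ca p c ⟨hlen, hple, h4, h5, h6⟩ m hm
          (fun hq => absurd hq (by omega)))
  · refine ⟨hlen, hp'le, ?_, ?_, h6⟩
    · intro q hq hpq
      exact h4 q hq (by omega)
    · intro q hq hqp'
      rcases lt_or_ge q p with hqp | hqp
      · rcases h5 q hq hqp with hT | hlo
        · exact Or.inl hT
        · exact Or.inr (by omega)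
      · exact Or.inr (by have := skipLow_below (catsOf arr) (k - n) p q hqp hqp' hq; omega)

-- the first available cat ≥ k-n lies inside the window: both sides catch it
lemma inv_step_catch (arr : List String) (n k : Int) (ca : List ACell) (p : Nat) (c : Int)
    (hInv : SimInv arr n k ca p c)
    (hlt : skipLow (catsOf arr) (k - n) p < (catsOf arr).length)
    (hle : (catsOf arr)[skipLow (catsOf arr) (k - n) p] ≤ k + n) :
    solveWhile arr ca k n (k - n)
        = ca.set ((catsOf arr)[skipLow (catsOf arr) (k - n) p]).toNat ACell.boolTrue ∧
      SimInv arr n (k + 1)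
        (ca.set ((catsOf arr)[skipLow (catsOf arr) (k - n) p]).toNat ACell.boolTrue)
        (skipLow (catsOf arr) (k - n) p + 1) (c + 1) := by
  obtain ⟨hlen, hple, h4, h5, h6⟩ := hInv
  set p' := skipLow (catsOf arr) (k - n) p with hp'
  have hp'ge : p ≤ p' := skipLow_ge _ _ _
  have hav := avail_at_skip arr n k ca p c ⟨hlen, hple, h4, h5, h6⟩ hlt
  obtain ⟨hj0, hjl, hjD⟩ := cats_elem arr p' hlt
  have hge : ¬ (catsOf arr)[p'] < k - n := skipLow_stop _ _ _ hlt
  have htoNat : (((catsOf arr)[p']).toNat : Int) = (catsOf arr)[p'] := by omega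
  constructor
  · rw [while_first arr ca k n ((catsOf arr)[p']) hav (k - n) (by omega)
      (fun m hm hmj => no_avail_between arr n k ca p c ⟨hlen, hple, h4, h5, h6⟩ m hm
        (fun _ => hmj))]
    rw [if_pos hle]
  · refine ⟨by simpa using hlen, by omega, ?_, ?_, ?_⟩
    · intro q hq hpq
      have hne : (catsOf arr)[q] ≠ (((catsOf arr)[p']).toNat : Int) := by
        rw [htoNat]
        exact ne_of_gt (cats_strict arr p' q (by omega) hq)
      rw [pyGet?_set_ne ca _ _ _ (cats_elem arr q hq).1 hne]
      exact h4 q hq (by omega)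
    · intro q hq hqp'
      rcases Nat.lt_succ_iff_lt_or_eq.mp hqp' with hqlt | rfl
      · rcases lt_or_ge q p with hqp | hqp
        · rcases h5 q hq hqp with hT | hlo
          · left
            by_cases hsame : (catsOf arr)[q] = (((catsOf arr)[p']).toNat : Int)
            · rw [hsame]
              exact pyGet?_set_self ca _ (by omega) (by omega)
            · rw [pyGet?_set_ne ca _ _ _ (cats_elem arr q hq).1 hsame]
              exact hT
          · exact Or.inr (by omega)
        · exact Or.inr
            (by have := skipLow_below (catsOf arr) (k - n) p q hqp hqlt hq; omega)
      · left
        rw [htoNat.symm] at hle ⊢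
        exact pyGet?_set_self ca _ (by omega) (by omega)
    · have hnT : ¬ ca[((catsOf arr)[p']).toNat]'(by omega) = ACell.boolTrue := by
        intro hT
        apply hav.2.2.2
        rw [PySem.List.pyGet?_eq_some_getElem _ hj0 (by omega), hT]
      rw [count_set_true ca _ (by omega) hnT]
      omega

-- a 'C' entry (or just moving the window) preserves the invariant
lemma inv_step_skip (arr : List String) (n k : Int) (ca : List ACell) (p : Nat) (c : Int)
    (hInv : SimInv arr n k ca p c) : SimInv arr n (k + 1) ca p c := by
  obtain ⟨hlen, hple, h4, h5, h6⟩ := hInv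
  refine ⟨hlen, hple, h4, ?_, h6⟩
  intro q hq hqp
  rcases h5 q hq hqp with hT | hlo
  · exact Or.inl hT
  · exact Or.inr (by omega)

-- ---- the main simulation ----

lemma main_fold (arr : List String) (n : Int) (suf : List String) :
    ∀ (k : Int) (ca : List ACell) (p : Nat) (c : Int), SimInv arr n k ca p c →
    (((PySem.List.enumerate suf k).foldl (stepA arr n) ca).count ACell.boolTrue : Int)
      = ((PySem.List.enumerate suf k).foldl (stepB (catsOf arr) n) (p, c)).2 := by
  induction suf with
  | nil =>
    intro k ca p c hInv
    simp [PySem.List.enumerate_nil]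
    exact hInv.2.2.2.2.symm
  | cons a suf' ih =>
    intro k ca p c hInv
    rw [PySem.List.enumerate_cons, List.foldl_cons, List.foldl_cons]
    by_cases hC : a = "C"
    · rw [show stepA arr n ca (k, a) = ca by simp [stepA, hC],
        show stepB (catsOf arr) n (p, c) (k, a) = (p, c) by simp [stepB, hC]]
      exact ih (k + 1) ca p c (inv_step_skip arr n k ca p c hInv)
    · have hA : stepA arr n ca (k, a) = solveWhile arr ca k n (k - n) := by
        simp [stepA, hC]
      rcases Nat.lt_or_ge (skipLow (catsOf arr) (k - n) p) (catsOf arr).length with hlt | hge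
      · by_cases hle : (catsOf arr)[skipLow (catsOf arr) (k - n) p] ≤ k + n
        · obtain ⟨hw, hInv'⟩ := inv_step_catch arr n k ca p c hInv hlt hle
          have hB : stepB (catsOf arr) n (p, c) (k, a)
              = (skipLow (catsOf arr) (k - n) p + 1, c + 1) := by
            simp [stepB, hC, hlt, hle]
          rw [hA, hw, hB]
          exact ih (k + 1) _ _ _ hInv'
        · obtain ⟨hw, hInv'⟩ := inv_step_miss arr n k ca p c hInv (fun _ => hle)
          have hB : stepB (catsOf arr) n (p, c) (k, a)
              = (skipLow (catsOf arr) (k - n) p, c) := by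
            simp [stepB, hC, hlt, hle]
          rw [hA, hw, hB]
          exact ih (k + 1) _ _ _ hInv'
      · obtain ⟨hw, hInv'⟩ := inv_step_miss arr n k ca p c hInv (fun hq => absurd hq (by omega))
        have hB : stepB (catsOf arr) n (p, c) (k, a)
            = (skipLow (catsOf arr) (k - n) p, c) := by
          simp [stepB, hC]
          intro hc
          omega
        rw [hA, hw, hB]
        exact ih (k + 1) _ _ _ hInv'

lemma inv_init (arr : List String) (n : Int) :
    SimInv arr n 0 (arr.map ACell.str) 0 0 := by
  refine ⟨by simp, by omega, ?_, by omega, ?_⟩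
  · intro q hq hpq
    obtain ⟨h0, hl, -⟩ := cats_elem arr q hq
    rw [PySem.List.pyGet?_eq_some_getElem _ h0 (by simpa using hl)]
    simp
  · have hnm : ACell.boolTrue ∉ arr.map ACell.str := by simp
    rw [List.count_eq_zero.mpr hnm]
    simp

-- ===== VERDICT (by name: the statement is the Claim_ definition above) =====
theorem solve_spec : Claim_equal_solve := by
  intro arr n _
  show solve arr n = solve_alt arr n
  exact main_fold arr n arr 0 (arr.map ACell.str) 0 0 (inv_init arr n)
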